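-- pv_equiv track=rewrite | github.com/LouisGobert/dev | Leetcode/python/Array/1704. Determine if String Halves Are Alike.py | halvesAreAlike
-- ===== SOURCE A (Python) =====
-- VOWELS = ["a", "e", "i", "o", "u", "A", "E", "I", "O", "U"]
--
-- def halvesAreAlike(s: str) -> bool:
--     mid_pos = len(s) // 2
--
--     cpt = 0
--     last_index = len(s) - 1
--     for index in range(mid_pos):
--         if s[index] in VOWELS:
--             cpt += 1
--         if s[last_index - index] in VOWELS:
--             cpt -= 1
--
--     return cpt == 0
-- ===== SOURCE B (Python) =====
-- VOWELS = frozenset("aeiouAEIOU")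
--
-- def _bisect_left(a, x):
--     lo, hi = 0, len(a)
--     while lo < hi:
--         mid = (lo + hi) // 2
--         if a[mid] < x:
--             lo = mid + 1
--         else:
--             hi = mid
--     return lo
--
-- def halvesAreAlike(s: str) -> bool:
--     positions = [i for i, c in enumerate(s) if c in VOWELS]
--     mid = len(s) // 2
--     left = _bisect_left(positions, mid)
--     right = len(positions) - _bisect_left(positions, len(s) - mid)
--     return left == right
-- ===== Notes on version B (the rewrite author's own statement) =====
-- stated objective: alternative
-- what changed: Replaces A's interleaved +1/-1 differential-counter loop over mirrored character indices with a vowel-position index: B builds the sorted list of vowel positions once (frozenset membership), then binary-searches it for the two half boundaries and compares the resulting counts.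
import Mathlib
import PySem

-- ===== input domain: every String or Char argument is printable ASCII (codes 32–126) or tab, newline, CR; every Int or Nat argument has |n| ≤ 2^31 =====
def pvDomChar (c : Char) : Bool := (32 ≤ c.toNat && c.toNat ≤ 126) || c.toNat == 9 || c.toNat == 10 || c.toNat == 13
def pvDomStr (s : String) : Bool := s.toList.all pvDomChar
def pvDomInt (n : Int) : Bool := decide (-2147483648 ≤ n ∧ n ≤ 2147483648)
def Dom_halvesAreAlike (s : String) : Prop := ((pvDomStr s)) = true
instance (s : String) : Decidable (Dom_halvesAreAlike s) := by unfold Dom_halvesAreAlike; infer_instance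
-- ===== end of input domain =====

-- B replaces A's interleaved +1/-1 counter over mirrored indices by a sorted list of vowel
-- positions queried with binary search at the two half boundaries; objective: alternative.

-- ===== PORT A =====
-- VOWELS = ["a","e","i","o","u","A","E","I","O","U"]  (1-char strings; ported as chars)
def vowelsA : List Char := ['a', 'e', 'i', 'o', 'u', 'A', 'E', 'I', 'O', 'U']

def halvesAreAlike (s : String) : Bool :=
  let l := s.toList
  let midPos := PySem.Int.floordiv (PySem.Str.len s) 2
  let lastIndex := PySem.Str.len s - 1
  let cpt : Int :=
    (PySem.List.pyRange 0 midPos 1).foldl (fun cpt index =>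
      -- both indices are always in range; Option.any gives the membership test's value
      let cpt := if (PySem.List.pyGet? l index).any (fun c => vowelsA.contains c) then cpt + 1 else cpt
      if (PySem.List.pyGet? l (lastIndex - index)).any (fun c => vowelsA.contains c) then cpt - 1 else cpt) 0
  cpt == 0

-- ===== PORT B =====
-- VOWELS = frozenset("aeiouAEIOU")
def vowelSetB : PySem.Set Char := PySem.Set.ofList "aeiouAEIOU".toList

-- hand-written bisect_left from Source B, transliterated: while loop → recursion on hi - lo
def bisectLeftB (a : List Int) (x : Int) (lo hi : Nat) : Nat :=
  if _h : lo < hi then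
    let mid := (lo + hi) / 2
    if a.getD mid 0 < x then bisectLeftB a x (mid + 1) hi   -- a[mid] is in range whenever hi ≤ len a
    else bisectLeftB a x lo mid
  else lo
termination_by hi - lo
decreasing_by all_goals omega

def halvesAreAlike_alt (s : String) : Bool :=
  let l := s.toList
  let positions : List Int := (PySem.List.enumerate l 0).filterMap
    (fun q => if PySem.Set.contains vowelSetB q.2 then some q.1 else none)
  let mid := PySem.Int.floordiv (PySem.Str.len s) 2
  let left : Int := (bisectLeftB positions mid 0 positions.length : Nat)
  let right : Int := (positions.length : Int) -
    (bisectLeftB positions (PySem.Str.len s - mid) 0 positions.length : Nat)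
  left == right

-- ===== PRECONDITION & SPEC =====
def Spec_halvesAreAlike (s : String) (out : Bool) : Prop := out = halvesAreAlike_alt s
instance (s : String) (out : Bool) : Decidable (Spec_halvesAreAlike s out) := by unfold Spec_halvesAreAlike; infer_instance

-- ===== CLAIM (what is proved, stated in full; the proofs are below) =====
def Claim_equal_halvesAreAlike : Prop := ∀ (s : String), Dom_halvesAreAlike s → Spec_halvesAreAlike s (halvesAreAlike s)

-- ===== LEMMAS AND PROOFS =====

-- A's membership test (list VOWELS) and B's (frozenset) are the same predicate
lemma vowelSetB_eq : vowelSetB = vowelsA := by decide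

-- characterisation of A's loop: vowels in the first m chars minus vowels in the last m chars
lemma foldA_eq (p : Char → Bool) (l : List Char) (L : Int) (hL : L = (l.length : Int))
    (m : Nat) (hm : m ≤ l.length) :
    (PySem.List.pyRange 0 (m : Int) 1).foldl
      (fun cpt index =>
        if (PySem.List.pyGet? l (L - 1 - index)).any p then
          (if (PySem.List.pyGet? l index).any p then cpt + 1 else cpt) - 1
        else if (PySem.List.pyGet? l index).any p then cpt + 1 else cpt) 0
    = ((l.take m).countP p : Int) - ((l.drop (l.length - m)).countP p : Int) := by
  subst hL
  induction m with
  | zero => simp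
  | succ m ih =>
    have hm' : m ≤ l.length := by omega
    have hlt : m < l.length := by omega
    have hcast : ((m + 1 : Nat) : Int) = (m : Int) + 1 := by push_cast; ring
    rw [hcast, PySem.List.pyRange_one_succ_right (by positivity), List.foldl_append, ih hm']
    have h1 : PySem.List.pyGet? l (m : Int) = some l[m] := by
      simp [PySem.List.pyGet?_natCast, List.getElem?_eq_getElem hlt]
    have hc2 : (l.length : Int) - 1 - (m : Int) = ((l.length - 1 - m : Nat) : Int) := by omega
    have h2 : PySem.List.pyGet? l ((l.length : Int) - 1 - (m : Int)) = some l[l.length - 1 - m] := by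
      rw [hc2]
      simp [PySem.List.pyGet?_natCast, List.getElem?_eq_getElem (by omega : l.length - 1 - m < l.length)]
    have htake : l.take (m + 1) = l.take m ++ l[m]?.toList := List.take_add_one
    have hdrop : l.drop (l.length - (m + 1)) = l[l.length - 1 - m] :: l.drop (l.length - m) := by
      have := List.drop_eq_getElem_cons (l := l) (i := l.length - 1 - m) (by omega)
      rw [show l.length - (m+1) = l.length - 1 - m by omega, this,
        show l.length - 1 - m + 1 = l.length - m by omega]
    simp only [List.foldl_cons, List.foldl_nil]
    rw [h1, h2, htake, hdrop]
    simp only [Option.any_some, List.countP_append, List.countP_cons,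
      List.getElem?_eq_getElem hlt, Option.toList_some, List.countP_nil]
    split_ifs <;> push_cast <;> omega

-- the position list B builds, in recursive form
def posL (p : Char → Bool) (i : Int) (l : List Char) : List Int :=
  (PySem.List.enumerate l i).filterMap (fun q => if p q.2 then some q.1 else none)

lemma posL_nil (p : Char → Bool) (i : Int) : posL p i [] = [] := by
  simp [posL, PySem.List.enumerate_nil]

lemma posL_cons (p : Char → Bool) (i : Int) (c : Char) (t : List Char) :
    posL p i (c :: t) = if p c then i :: posL p (i + 1) t else posL p (i + 1) t := by
  simp only [posL, PySem.List.enumerate_cons, List.filterMap_cons]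
  split_ifs <;> rfl

lemma mem_posL (p : Char → Bool) (l : List Char) : ∀ (i x : Int), x ∈ posL p i l → i ≤ x := by
  induction l with
  | nil => intro i x h; simp [posL_nil] at h
  | cons c t ih =>
    intro i x h
    rw [posL_cons] at h
    split_ifs at h with hc
    · rcases List.mem_cons.mp h with h | h
      · omega
      · have := ih (i + 1) x h; omega
    · have := ih (i + 1) x h; omega

lemma posL_sorted (p : Char → Bool) (l : List Char) : ∀ (i : Int), (posL p i l).Pairwise (· ≤ ·) := by
  induction l with
  | nil => intro i; simp [posL_nil]
  | cons c t ih =>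
    intro i
    rw [posL_cons]
    split_ifs with hc
    · exact List.pairwise_cons.mpr ⟨fun y hy => by have := mem_posL p t (i+1) y hy; omega, ih (i+1)⟩
    · exact ih (i + 1)

lemma posL_length (p : Char → Bool) (l : List Char) : ∀ (i : Int), (posL p i l).length = l.countP p := by
  induction l with
  | nil => intro i; simp [posL_nil]
  | cons c t ih =>
    intro i
    rw [posL_cons, List.countP_cons]
    split_ifs with hc <;> simp [ih]

lemma posL_countP_lt (p : Char → Bool) (l : List Char) :
    ∀ (i : Int) (k : Nat),
      (posL p i l).countP (fun x => x < i + (k : Int)) = (l.take k).countP p := by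
  induction l with
  | nil => intro i k; simp [posL_nil]
  | cons c t ih =>
    intro i k
    cases k with
    | zero =>
      simp only [Nat.cast_zero, add_zero, List.take_zero, List.countP_nil]
      rw [List.countP_eq_zero]
      intro x hx
      have := mem_posL p (c :: t) i x hx
      simp; omega
    | succ k =>
      rw [posL_cons, List.take_succ_cons, List.countP_cons]
      have hc1 : i + ((k + 1 : Nat) : Int) = (i + 1) + (k : Int) := by push_cast; ring
      split_ifs with hc
      · rw [List.countP_cons, hc1, ih]
        have hone : i < i + 1 + (k : Int) := by omega
        simp [hone]
      · rw [hc1, ih]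
        simp

-- elements satisfy the predicate exactly below position r  →  countP = r
lemma countP_eq_of_split (a : List Int) (x : Int) (r : Nat) (hr : r ≤ a.length)
    (h1 : ∀ i (h : i < a.length), i < r → a[i] < x)
    (h2 : ∀ i (h : i < a.length), r ≤ i → x ≤ a[i]) :
    a.countP (fun y => y < x) = r := by
  have hsplit : a = a.take r ++ a.drop r := (List.take_append_drop r a).symm
  rw [hsplit, List.countP_append]
  have htake : (a.take r).countP (fun y => y < x) = r := by
    rw [List.countP_eq_length.mpr, List.length_take_of_le hr]
    intro y hy
    obtain ⟨i, hi, hget⟩ := List.mem_iff_getElem.mp hy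
    have hil : i < a.length := by
      have := List.length_take_of_le hr (l := a); omega
    have : a[i] = y := by rw [← hget]; simp
    simp only [decide_eq_true_eq]
    rw [← this]
    exact h1 i hil (by have := List.length_take_of_le hr (l := a); omega)
  have hdrop : (a.drop r).countP (fun y => y < x) = 0 := by
    rw [List.countP_eq_zero]
    intro y hy
    obtain ⟨i, hi, hget⟩ := List.mem_iff_getElem.mp hy
    rw [List.getElem_drop] at hget
    have := h2 (r + i) (by simp at hi; omega) (by omega)
    simp only [decide_eq_true_eq]
    omega
  omega

lemma bisectLeftB_spec (a : List Int) (x : Int) (hs : a.Pairwise (· ≤ ·)) :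
    ∀ (n lo hi : Nat), hi - lo = n → hi ≤ a.length → lo ≤ hi →
    (∀ i (h : i < a.length), i < lo → a[i] < x) →
    (∀ i (h : i < a.length), hi ≤ i → x ≤ a[i]) →
    bisectLeftB a x lo hi = a.countP (fun y => y < x) := by
  have hmono : ∀ i j (hi : i < a.length) (hj : j < a.length), i ≤ j → a[i] ≤ a[j] := by
    intro i j hi hj hij
    rcases Nat.lt_or_ge i j with h | h
    · exact List.pairwise_iff_getElem.mp hs i j hi hj h
    · have : i = j := by omega
      subst this; rfl
  intro n
  induction n using Nat.strong_induction_on with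
  | _ n ih =>
    intro lo hi hn hhil hlohi h1 h2
    rw [bisectLeftB]
    by_cases hlt : lo < hi
    · simp only [hlt, dif_pos]
      have hmid1 : lo ≤ (lo + hi) / 2 := by omega
      have hmid2 : (lo + hi) / 2 < hi := by omega
      have hmidl : (lo + hi) / 2 < a.length := by omega
      have hget : a.getD ((lo + hi) / 2) 0 = a[(lo + hi) / 2] := List.getD_eq_getElem a 0 hmidl
      rw [hget]
      by_cases hx : a[(lo + hi) / 2] < x
      · simp only [hx, if_pos]
        refine ih (hi - ((lo + hi) / 2 + 1)) (by omega) _ _ rfl hhil (by omega) ?_ h2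
        intro i hil hi'
        rcases Nat.lt_or_ge i lo with h | h
        · exact h1 i hil h
        · exact lt_of_le_of_lt (hmono i ((lo + hi) / 2) hil hmidl (by omega)) hx
      · simp only [hx, if_neg, not_false_iff]
        refine ih ((lo + hi) / 2 - lo) (by omega) _ _ rfl (by omega) (by omega) h1 ?_
        intro i hil hi'
        exact le_trans (le_of_not_gt hx) (hmono ((lo + hi) / 2) i hmidl hil hi')
    · simp only [hlt, dif_neg, not_false_iff]
      have hlo : lo = hi := by omega
      subst hlo
      exact (countP_eq_of_split a x lo (by omega) (fun i h hi => h1 i h hi)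
        (fun i h hi => h2 i h hi)).symm

lemma bisect_full (a : List Int) (x : Int) (hs : a.Pairwise (· ≤ ·)) :
    bisectLeftB a x 0 a.length = a.countP (fun y => y < x) :=
  bisectLeftB_spec a x hs a.length 0 a.length rfl le_rfl (Nat.zero_le _)
    (by intro i h hi; omega) (by intro i h hi; omega)

lemma posL_countP_lt0 (p : Char → Bool) (l : List Char) (k : Nat) :
    (posL p 0 l).countP (fun x => x < (k : Int)) = (l.take k).countP p := by
  simpa using posL_countP_lt p l 0 k

lemma countP_take_drop (p : Char → Bool) (l : List Char) (k : Nat) :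
    l.countP p = (l.take k).countP p + (l.drop k).countP p := by
  conv_lhs => rw [← List.take_append_drop k l]
  rw [List.countP_append]

theorem halvesAreAlike_spec : Claim_equal_halvesAreAlike := by
  intro s _
  unfold Spec_halvesAreAlike
  simp only [halvesAreAlike, halvesAreAlike_alt, vowelSetB_eq,
    PySem.Set.contains_eq_listContains]
  set p : Char → Bool := fun c => vowelsA.contains c with hp
  set m := s.toList.length / 2 with hmdef
  have hm : m ≤ s.toList.length := Nat.div_le_self _ 2
  have hlen_eq : PySem.Str.len s = ((s.toList.length : Nat) : Int) := by simp
  have hfd : PySem.Int.floordiv (PySem.Str.len s) 2 = ((m : Nat) : Int) := by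
    rw [hlen_eq]; exact_mod_cast PySem.Int.floordiv_natCast s.toList.length 2
  have hsub : PySem.Str.len s - ((m : Nat) : Int) = ((s.toList.length - m : Nat) : Int) := by
    rw [hlen_eq]; omega
  have hposrfl : (PySem.List.enumerate s.toList 0).filterMap
      (fun q => if p q.2 then some q.1 else none) = posL p 0 s.toList := rfl
  rw [hfd, hsub, hposrfl]
  have hsorted := posL_sorted p s.toList 0
  have hlen := posL_length p s.toList 0
  have hL := bisect_full (posL p 0 s.toList) ((m : Nat) : Int) hsorted
  have hR := bisect_full (posL p 0 s.toList) ((s.toList.length - m : Nat) : Int) hsorted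
  have hfe := foldA_eq p s.toList (PySem.Str.len s) hlen_eq m hm
  rw [hL, hR, posL_countP_lt0, posL_countP_lt0, hlen, hfe]
  have hsplit := countP_take_drop p s.toList (s.toList.length - m)
  rw [Bool.eq_iff_iff, beq_iff_eq, beq_iff_eq, sub_eq_zero]
  constructor <;> intro h <;> omega
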